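-- pv_equiv track=rewrite | github.com/YashB63/GFG-Daily-Questions | Day 44/Jumping Caterpillars/jumping_caterpillars.py | uneatenLeaves
-- ===== SOURCE A (Python) =====
-- def uneatenLeaves(arr,n,k):
--
--     res = [1 for i in range(n + 1)]
--     res[0] = 0
--     for i in range(len(arr)):
--         if(arr[i] <= n and res[arr[i]]==1):
--             for j in range(arr[i], n+1, arr[i]):
--                 res[j]=0
--     return sum(res)
-- ===== SOURCE B (Python) =====
-- def uneatenLeaves(arr, n, k):
--     return sum(1 for leaf in range(1, n + 1)
--                if all(a <= 0 or leaf % a != 0 for a in arr))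
-- ===== Notes on version B (the rewrite author's own statement) =====
-- stated objective: simpler
-- what changed: Replaces the mutable 0/1 sieve list (mark every multiple of every array element, then sum) by a direct per-leaf scan that counts each leaf in 1..n iff no positive array element divides it.
import Mathlib
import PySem

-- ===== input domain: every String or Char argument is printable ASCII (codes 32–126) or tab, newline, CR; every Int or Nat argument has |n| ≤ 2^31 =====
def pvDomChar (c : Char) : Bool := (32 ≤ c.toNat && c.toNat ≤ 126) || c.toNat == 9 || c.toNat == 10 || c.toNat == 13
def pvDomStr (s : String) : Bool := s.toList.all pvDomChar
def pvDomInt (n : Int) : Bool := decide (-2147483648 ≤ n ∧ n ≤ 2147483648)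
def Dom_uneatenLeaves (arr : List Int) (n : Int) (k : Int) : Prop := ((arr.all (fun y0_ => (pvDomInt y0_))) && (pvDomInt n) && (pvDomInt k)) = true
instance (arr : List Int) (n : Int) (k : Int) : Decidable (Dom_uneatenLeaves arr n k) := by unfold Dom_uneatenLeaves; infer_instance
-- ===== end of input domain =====

-- B replaces A's mutable 0/1 sieve list by a direct per-leaf scan (count each leaf in 1..n
-- iff no positive array element divides it): simpler, no different speed claimed.

-- ===== PORT A =====
def uneatenLeaves (arr : List Int) (n : Int) (k : Int) : Int :=
  -- res = [1 for i in range(n + 1)]; res[0] = 0  (Python raises IndexError when res is empty,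
  -- i.e. n < 0 — excluded by Pre_; List.set is then a no-op)
  let res0 : List Int := ((PySem.List.pyRange 0 (n + 1) 1).map (fun _ => (1 : Int))).set 0 0
  let res := arr.foldl (fun r a =>
      if a ≤ n ∧ PySem.List.pyGet? r a = some 1 then
        (PySem.List.pyRange a (n + 1) a).foldl (fun r' j => PySem.List.pySetD r' j 0) r
      else r) res0
  res.sum

-- ===== PORT B =====
def uneatenLeaves_alt (arr : List Int) (n : Int) (k : Int) : Int :=
  (PySem.List.pyRange 1 (n + 1) 1).foldl
    (fun acc leaf =>
      if arr.all (fun a => decide (a ≤ 0) || decide (PySem.Int.mod leaf a ≠ 0)) then acc + 1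
      else acc) 0

-- ===== PRECONDITION & SPEC =====
-- Pre_ excludes exactly the inputs on which Python's A raises IndexError: n < 0 (res[0] on an
-- empty list) or some arr element below -(n+1) (negative index past the front of res).
def Pre_uneatenLeaves (arr : List Int) (n : Int) (k : Int) : Prop :=
  0 ≤ n ∧ ∀ a ∈ arr, -(n + 1) ≤ a
instance (arr : List Int) (n : Int) (k : Int) : Decidable (Pre_uneatenLeaves arr n k) := by
  unfold Pre_uneatenLeaves; infer_instance
def pvWitness_uneatenLeaves : List Int × Int × Int := ([2, 3], 10, 0)

def Spec_uneatenLeaves (arr : List Int) (n : Int) (k : Int) (out : Int) : Prop := out = uneatenLeaves_alt arr n k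
instance (arr : List Int) (n : Int) (k : Int) (out : Int) : Decidable (Spec_uneatenLeaves arr n k out) := by unfold Spec_uneatenLeaves; infer_instance

-- ===== CLAIM (what is proved, stated in full; the proofs are below) =====
def Claim_equal_uneatenLeaves : Prop := ∀ (arr : List Int) (n : Int) (k : Int), Dom_uneatenLeaves arr n k → Pre_uneatenLeaves arr n k → Spec_uneatenLeaves arr n k (uneatenLeaves arr n k)
-- ===== LEMMAS AND PROOFS =====

-- `j` is eaten given the processed prefix P of arr: j = 0 (A zeroes res[0]) or some positive
-- element of P divides j.
def pvCoveredB (P : List Int) (j : Int) : Bool := P.any (fun a => decide (0 < a) && decide (a ∣ j))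
def pvDead (P : List Int) (j : Int) : Bool := decide (j = 0) || pvCoveredB P j

-- the contents of A's res list after processing the prefix P of arr
def pvModel (P : List Int) (n : Int) : List Int :=
  (PySem.List.pyRange 0 (n + 1) 1).map (fun j => if pvDead P j then 0 else 1)

lemma pvRange_neg_empty (a b s : Int) (hs : s < 0) (h : a ≤ b) : PySem.List.pyRange a b s = [] := by
  simp only [PySem.List.pyRange, if_neg hs.ne, if_neg (not_lt.2 hs.le), if_neg (not_lt.2 h)]
  simp

lemma pvLength_model (P : List Int) (n : Int) : (pvModel P n).length = (n + 1).toNat := by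
  simp [pvModel, PySem.List.pyRange_one]

lemma pvModel_getElem? (P : List Int) (n : Int) (i : Nat) (hi : i < (n + 1).toNat) :
    (pvModel P n)[i]? = some (if pvDead P (i : Int) then 0 else 1) := by
  have := PySem.List.getElem?_map_pyRange_zero
      (fun j => if pvDead P j then (0 : Int) else 1) (n + 1).toNat i hi
  have hcast : ((( n + 1).toNat : Int)) = n + 1 := by
    omega
  rw [hcast] at this
  simpa [pvModel] using this

lemma pvModel_congr (P Q : List Int) (n : Int)
    (h : ∀ j : Int, 0 ≤ j → j < n + 1 → pvDead P j = pvDead Q j) :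
    pvModel P n = pvModel Q n := by
  unfold pvModel
  refine List.map_congr_left (fun j hj => ?_)
  rw [PySem.List.mem_pyRange_one] at hj
  rw [h j hj.1 hj.2]

lemma pvDead_append (P : List Int) (a j : Int) :
    pvDead (P ++ [a]) j = (pvDead P j || (decide (0 < a) && decide (a ∣ j))) := by
  simp [pvDead, pvCoveredB, List.any_append, Bool.or_assoc]

lemma pvFoldl_set_getElem? (ids : List Int) (r : List Int) (hpos : ∀ j ∈ ids, 0 ≤ j) (i : Nat) :
    (ids.foldl (fun r' j => PySem.List.pySetD r' j 0) r)[i]? =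
      if (i : Int) ∈ ids then (if i < r.length then some 0 else none) else r[i]? := by
  induction ids generalizing r with
  | nil => simp
  | cons j t ih =>
    have hj : 0 ≤ j := hpos j (by simp)
    simp only [List.foldl_cons]
    rw [ih (PySem.List.pySetD r j 0) (fun x hx => hpos x (List.mem_cons_of_mem _ hx)),
        PySem.List.pySetD_of_nonneg r 0 hj]
    by_cases hmem : (i : Int) ∈ t
    · simp [hmem, List.mem_cons, List.length_set]
    · by_cases hij : (i : Int) = j
      · have hji : j.toNat = i := by omega
        rw [if_neg hmem, if_pos (List.mem_cons.2 (Or.inl hij))]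
        by_cases hlen : i < r.length
        · rw [if_pos hlen, ← hji, List.getElem?_set_self (by omega)]
        · rw [if_neg hlen, List.getElem?_eq_none (by simp; omega)]
      · simp [hmem, hij, List.mem_cons, List.getElem?_set_ne (by omega : j.toNat ≠ i)]

-- one pass of A's outer loop, applied to the model list, yields the model of the longer prefix
lemma pvStep_model (n : Int) (hn : 0 ≤ n) (P : List Int) (a : Int) :
    (if a ≤ n ∧ PySem.List.pyGet? (pvModel P n) a = some 1 then
        (PySem.List.pyRange a (n + 1) a).foldl (fun r' j => PySem.List.pySetD r' j 0) (pvModel P n)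
      else pvModel P n) = pvModel (P ++ [a]) n := by
  by_cases ha : 0 < a
  · -- positive a
    by_cases han : a ≤ n
    · -- a in 1..n: read the model entry at index a
      have hiN : a.toNat < (n + 1).toNat := by omega
      have hget : PySem.List.pyGet? (pvModel P n) a =
          some (if pvDead P a then 0 else 1) := by
        have hc : ((a.toNat : Int)) = a := by omega
        rw [← hc, PySem.List.pyGet?_natCast, pvModel_getElem? P n a.toNat hiN, hc]
      by_cases hdead : pvDead P a = true
      · -- res[a] = 0: skipped, and the model is unchanged (a is divisible by an earlier divisor)
        rw [if_neg]
        · refine pvModel_congr P (P ++ [a]) n (fun j _ _ => ?_)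
          rw [pvDead_append]
          have ha0 : a ≠ 0 := by omega
          rcases (by simpa [pvDead, pvCoveredB, ha0] using hdead :
              ∃ b ∈ P, 0 < b ∧ b ∣ a) with ⟨b, hbP, hb0, hba⟩
          by_cases haj : a ∣ j
          · have : pvCoveredB P j = true := by
              simp only [pvCoveredB, List.any_eq_true]
              exact ⟨b, hbP, by simp [hb0, hba.trans haj]⟩
            simp [pvDead, this, ha, haj]
          · simp [ha, haj]
        · rw [hget]; simp [hdead]
      · -- res[a] = 1: the inner loop zeroes exactly the multiples of a up to n
        rw [if_pos ⟨han, by rw [hget]; simp [hdead]⟩]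
        have hpos : ∀ j ∈ PySem.List.pyRange a (n + 1) a, (0 : Int) ≤ j := fun j hj => by
          have := (PySem.List.mem_pyRange_iff_of_pos ha j).1 hj
          omega
        refine List.ext_getElem? (fun i => ?_)
        rw [pvFoldl_set_getElem? _ _ hpos i, pvLength_model]
        by_cases hiN : i < (n + 1).toNat
        · rw [pvModel_getElem? _ _ _ hiN, pvModel_getElem? _ _ _ hiN, if_pos hiN,
              pvDead_append]
          by_cases hmem : (i : Int) ∈ PySem.List.pyRange a (n + 1) a
          · have hdvd : a ∣ (i : Int) := by
              have h := (PySem.List.mem_pyRange_iff_of_pos ha (i : Int)).1 hmem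
              have h2 : a ∣ (i : Int) - a + a := dvd_add h.2.2 dvd_rfl
              simpa using h2
            simp [hmem, ha, hdvd]
          · rw [if_neg hmem]
            rcases Nat.eq_zero_or_pos i with hi0 | hi0
            · subst hi0; simp [pvDead]
            · have hdvd : ¬ a ∣ (i : Int) := by
                intro hd
                refine hmem ((PySem.List.mem_pyRange_iff_of_pos ha (i : Int)).2 ?_)
                refine ⟨Int.le_of_dvd (by exact_mod_cast hi0) hd, by omega, ?_⟩
                exact dvd_sub hd dvd_rfl
              simp [ha, hdvd]
        · have h1 : ¬ i < (n + 1).toNat := hiN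
          rw [if_neg h1]
          rw [List.getElem?_eq_none (l := pvModel P n) (by rw [pvLength_model]; omega),
              List.getElem?_eq_none (l := pvModel (P ++ [a]) n) (by rw [pvLength_model]; omega)]
          simp
    · -- a > n: skipped, and no leaf in 0..n is a multiple of a
      rw [if_neg (by intro h; exact han h.1)]
      refine pvModel_congr P (P ++ [a]) n (fun j hj0 hjn => ?_)
      rw [pvDead_append]
      by_cases hj : (j = 0)
      · simp [pvDead, hj]
      · have : ¬ a ∣ j := by
          intro hd
          have := Int.le_of_dvd (by omega) hd
          omega
        simp [ha, this]
  · -- a ≤ 0: never marks anything (a = 0 has res[0] = 0; a < 0 gives an empty range)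
    have hmod : pvModel (P ++ [a]) n = pvModel P n := by
      refine pvModel_congr (P ++ [a]) P n (fun j _ _ => ?_)
      rw [pvDead_append]
      simp [ha]
    rw [hmod]
    split_ifs with hc
    · rcases lt_or_eq_of_le (not_lt.1 ha) with ha' | ha'
      · rw [pvRange_neg_empty a (n + 1) a ha' (by omega)]
        simp
      · exfalso
        rw [ha'] at hc
        have hget0 := PySem.List.pyGet?_natCast (pvModel P n) 0
        rw [pvModel_getElem? P n 0 (by omega)] at hget0
        norm_num at hget0
        rw [hget0] at hc
        simp [pvDead] at hc
    · rfl

lemma pvFoldl_model (n : Int) (hn : 0 ≤ n) (l P : List Int) :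
    l.foldl (fun r a =>
        if a ≤ n ∧ PySem.List.pyGet? r a = some 1 then
          (PySem.List.pyRange a (n + 1) a).foldl (fun r' j => PySem.List.pySetD r' j 0) r
        else r) (pvModel P n) = pvModel (P ++ l) n := by
  induction l generalizing P with
  | nil => simp
  | cons a t ih =>
    simp only [List.foldl_cons]
    rw [pvStep_model n hn P a, ih (P ++ [a])]
    simp

lemma pvInit_model (n : Int) (hn : 0 ≤ n) :
    ((PySem.List.pyRange 0 (n + 1) 1).map (fun _ => (1 : Int))).set 0 0 = pvModel [] n := by
  unfold pvModel
  rw [PySem.List.pyRange_one_cons (by omega : (0 : Int) < n + 1)]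
  simp only [zero_add, List.map_cons, List.set_cons_zero]
  have h1 : ∀ j ∈ PySem.List.pyRange 1 (n + 1),
      (fun j => if pvDead [] j then (0:Int) else 1) j = (fun _ => (1:Int)) j := by
    intro j hj
    rw [PySem.List.mem_pyRange_one] at hj
    simp [pvDead, pvCoveredB, show j ≠ 0 by omega]
  rw [List.map_congr_left h1]
  simp [pvDead]

lemma pvAll_iff (arr : List Int) (j : Int) :
    ((arr.all fun a => decide (a ≤ 0) || decide (PySem.Int.mod j a ≠ 0)) = true) ↔
      pvCoveredB arr j = false := by
  simp only [List.all_eq_true, pvCoveredB, List.any_eq_false, Bool.or_eq_true,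
    decide_eq_true_eq, Bool.and_eq_true, not_and]
  constructor
  · intro h a ha hc
    rcases h a ha with h1 | h1
    · exact absurd hc (by omega)
    · intro hd
      exact h1 ((PySem.Int.mod_eq_zero_iff_dvd j a).2 hd)
  · intro h a ha
    by_cases h0 : a ≤ 0
    · exact Or.inl h0
    · exact Or.inr (fun hm => h a ha (by omega) ((PySem.Int.mod_eq_zero_iff_dvd j a).1 hm))

lemma pvSum_model (arr : List Int) (n : Int) (hn : 0 ≤ n) :
    (pvModel arr n).sum = uneatenLeaves_alt arr n 0 := by
  unfold pvModel uneatenLeaves_alt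
  rw [PySem.List.pyRange_one_cons (by omega : (0 : Int) < n + 1)]
  simp only [zero_add, List.map_cons, List.sum_cons]
  have hp : ∀ j ∈ PySem.List.pyRange 1 (n + 1),
      (fun j => if pvDead arr j then (0:Int) else 1) j =
      (fun j => if (arr.all fun a => decide (a ≤ 0) || decide (PySem.Int.mod j a ≠ 0)) = true
                then (1:Int) else 0) j := by
    intro j hj
    rw [PySem.List.mem_pyRange_one] at hj
    have hne : j ≠ 0 := by omega
    beta_reduce
    by_cases hcov : pvCoveredB arr j = true
    · have hall : ¬ ((arr.all fun a => decide (a ≤ 0) || decide (PySem.Int.mod j a ≠ 0)) = true) := by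
        intro h
        rw [pvAll_iff] at h
        rw [h] at hcov
        exact Bool.false_ne_true hcov
      rw [if_pos (show pvDead arr j = true by simp [pvDead, hcov]), if_neg hall]
    · have hall : (arr.all fun a => decide (a ≤ 0) || decide (PySem.Int.mod j a ≠ 0)) = true :=
        (pvAll_iff arr j).2 (by simpa using hcov)
      rw [if_neg (show ¬ pvDead arr j = true by simp [pvDead, hne, hcov]), if_pos hall]
  rw [List.map_congr_left hp,
      PySem.List.sum_map_ite_one_zero
        (fun j => arr.all fun a => decide (a ≤ 0) || decide (PySem.Int.mod j a ≠ 0)),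
      PySem.List.foldl_if_add_one
        (fun leaf => arr.all fun a => decide (a ≤ 0) || decide (PySem.Int.mod leaf a ≠ 0))]
  simp [pvDead]

lemma pvAlt_k_irrelevant (arr : List Int) (n k : Int) :
    uneatenLeaves_alt arr n k = uneatenLeaves_alt arr n 0 := rfl

-- ===== VERDICT (by name: the statement is the Claim_ definition above) =====
theorem uneatenLeaves_spec : Claim_equal_uneatenLeaves := by
  intro arr n k _ hpre
  unfold Spec_uneatenLeaves uneatenLeaves
  simp only [pvInit_model n hpre.1, pvFoldl_model n hpre.1 arr [], List.nil_append]
  rw [pvAlt_k_irrelevant]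
  exact (pvSum_model arr n hpre.1)
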